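-- pv_equiv track=rewrite | github.com/MIT-Emerging-Talent/ET6-practice-code-review | solutions/max_coders_chessboard.py | max_coders_chessboard
-- ===== SOURCE A (Python) =====
-- from typing import List, Tuple
--
-- def max_coders_chessboard(n: int) -> Tuple[int, List[str]]:
--     """
--     Calculates the maximum number of Coders that can be placed on an n x n
--     chessboard without any two Coders attacking each other.
--
--     Arguments:
--     n : int
--         The size of the chessboard (1 ≤ n ≤ 1000).
--
--     Returns:
--     Tuple[int, List[str]]
--         - The maximum number of Coders that can be placed.
--         - The configuration of the chessboard as a list of strings.
--
--     Raises:
--     ValueError: If `n` is not in the range 1 to 1000 inclusive.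
--
--     Examples:
--     >>> max_coders_chessboard(3)
--     (5, ['C.C', '.C.', 'C.C'])
--
--     >>> max_coders_chessboard(4)
--     (8, ['C.C.', '.C.C', 'C.C.', '.C.C'])
--
--     >>> max_coders_chessboard(1)
--     (1, ['C'])
--     """
--     if not (1 <= n <= 1000):
--         raise ValueError(
--             "The size of the chessboard must be between 1 and 1000 inclusive."
--         )
--
--     count = 0
--     board = []
--
--     for i in range(n):
--         row = []
--         for j in range(n):
--             if (i + j) % 2 == 0:  # Checkerboard pattern
--                 row.append("C")
--                 count += 1
--             else:
--                 row.append(".")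
--         board.append("".join(row))
--
--     return count, board
-- ===== SOURCE B (Python) =====
-- from typing import List, Tuple
--
-- def max_coders_chessboard(n: int) -> Tuple[int, List[str]]:
--     if not (1 <= n <= 1000):
--         raise ValueError(
--             "The size of the chessboard must be between 1 and 1000 inclusive."
--         )
--     count = (n * n + 1) // 2
--     even_row = "".join("C" if j % 2 == 0 else "." for j in range(n))
--     odd_row = "".join("." if j % 2 == 0 else "C" for j in range(n))
--     board = [even_row if i % 2 == 0 else odd_row for i in range(n)]
--     return count, board
-- ===== Notes on version B (the rewrite author's own statement) =====
-- stated objective: simpler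
-- what changed: Replaces the per-cell nested loop (incrementing a counter cell by cell and building each row character by character) with a closed-form count (n*n+1)//2 and two template rows built once and reused for all n rows.
import Mathlib
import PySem

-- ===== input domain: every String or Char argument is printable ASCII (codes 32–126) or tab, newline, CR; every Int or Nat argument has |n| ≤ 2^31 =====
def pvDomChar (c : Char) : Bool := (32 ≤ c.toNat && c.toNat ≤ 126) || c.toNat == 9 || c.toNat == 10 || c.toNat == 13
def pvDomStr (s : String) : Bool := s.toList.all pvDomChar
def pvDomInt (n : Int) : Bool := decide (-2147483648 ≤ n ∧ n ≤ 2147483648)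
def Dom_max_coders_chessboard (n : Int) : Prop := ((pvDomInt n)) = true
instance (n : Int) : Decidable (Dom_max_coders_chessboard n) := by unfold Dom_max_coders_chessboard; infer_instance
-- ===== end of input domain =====

-- B replaces A's per-cell nested counting loop with a closed-form count (n*n+1)//2 and two
-- template rows built once (objective: simpler). Where A raises ValueError (n outside 1..1000)
-- both ports return (0, []); Pre_ excludes those inputs.

-- ===== PORT A =====
def max_coders_chessboard (n : Int) : Int × List String :=
  if ¬ (1 ≤ n ∧ n ≤ 1000) then (0, [])   -- Python raises ValueError here; excluded by Pre_
  else
    let st := (PySem.List.pyRange 0 n 1).foldl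
      (fun (st : Int × List String) i =>
        let r := (PySem.List.pyRange 0 n 1).foldl
          (fun (rc : List String × Int) j =>
            if PySem.Int.mod (i + j) 2 = 0 then (rc.1 ++ ["C"], rc.2 + 1)
            else (rc.1 ++ ["."], rc.2))
          ([], st.1)
        (r.2, st.2 ++ [PySem.Str.join "" r.1]))
      (0, [])
    (st.1, st.2)

-- ===== PORT B =====
def max_coders_chessboard_alt (n : Int) : Int × List String :=
  if ¬ (1 ≤ n ∧ n ≤ 1000) then (0, [])   -- Python raises ValueError here; excluded by Pre_
  else
    let even_row := PySem.Str.join ""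
      ((PySem.List.pyRange 0 n 1).map (fun j => if PySem.Int.mod j 2 = 0 then "C" else "."))
    let odd_row := PySem.Str.join ""
      ((PySem.List.pyRange 0 n 1).map (fun j => if PySem.Int.mod j 2 = 0 then "." else "C"))
    (PySem.Int.floordiv (n * n + 1) 2,
     (PySem.List.pyRange 0 n 1).map (fun i => if PySem.Int.mod i 2 = 0 then even_row else odd_row))

-- ===== PRECONDITION & SPEC =====
-- Exactly the inputs on which Python's A returns (it raises ValueError otherwise).
def Pre_max_coders_chessboard (n : Int) : Prop := 1 ≤ n ∧ n ≤ 1000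
instance (n : Int) : Decidable (Pre_max_coders_chessboard n) := by unfold Pre_max_coders_chessboard; infer_instance
def pvWitness_max_coders_chessboard : Int := 3

def Spec_max_coders_chessboard (n : Int) (out : Int × List String) : Prop := out = max_coders_chessboard_alt n
instance (n : Int) (out : Int × List String) : Decidable (Spec_max_coders_chessboard n out) := by unfold Spec_max_coders_chessboard; infer_instance

-- ===== CLAIM (what is proved, stated in full; the proofs are below) =====
def Claim_equal_max_coders_chessboard : Prop := ∀ (n : Int), Dom_max_coders_chessboard n → Pre_max_coders_chessboard n → Spec_max_coders_chessboard n (max_coders_chessboard n)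

-- ===== LEMMAS AND PROOFS =====

-- A's row-i cell list as a map over column indices.
def pvRowList (i : Int) (m : Nat) : List String :=
  (List.range m).map (fun (j : Nat) => if PySem.Int.mod (i + (j : Int)) 2 = 0 then "C" else ".")

-- number of 'C's A places in row i (columns 0..m-1)
def pvCnt (i : Int) (m : Nat) : Nat :=
  (List.range m).countP (fun (j : Nat) => decide (PySem.Int.mod (i + (j : Int)) 2 = 0))

lemma pv_inner (i c : Int) (m : Nat) :
    (((List.range m).map (fun (k : Nat) => (k : Int))).foldl
      (fun (rc : List String × Int) j =>
        if PySem.Int.mod (i + j) 2 = 0 then (rc.1 ++ ["C"], rc.2 + 1)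
        else (rc.1 ++ ["."], rc.2)) ([], c))
    = (pvRowList i m, c + (pvCnt i m : Int)) := by
  induction m with
  | zero => simp [pvRowList, pvCnt]
  | succ m ih =>
    rw [List.range_succ, List.map_append, List.foldl_append, ih]
    by_cases h : (2:Int) ∣ i + (m : Int)
    · simp [pvRowList, pvCnt, List.range_succ, List.countP_append, h]
      ring
    · simp [pvRowList, pvCnt, List.range_succ, List.countP_append, h]

lemma pv_cnt_closed (i : Int) (m : Nat) :
    pvCnt i m = if i % 2 = 0 then (m + 1) / 2 else m / 2 := by
  induction m with
  | zero => simp [pvCnt]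
  | succ m ih =>
    unfold pvCnt at *
    rw [List.range_succ, List.countP_append, ih]
    by_cases h : (2:Int) ∣ i + (m : Int) <;> by_cases hp : i % 2 = 0 <;>
      simp [h, hp] <;> omega

lemma pv_sum_ite_parity (a b m : Nat) :
    ((List.range m).map (fun i => if i % 2 = 0 then a else b)).sum
      = ((m + 1) / 2) * a + (m / 2) * b := by
  induction m with
  | zero => simp
  | succ m ih =>
    rw [List.range_succ, List.map_append, List.sum_append, ih]
    rcases Nat.even_or_odd m with ⟨t, ht⟩ | ⟨t, ht⟩
    · subst ht
      have h1 : (t + t + 1) / 2 = t := by omega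
      have h2 : (t + t) / 2 = t := by omega
      have h3 : (t + t + 1 + 1) / 2 = t + 1 := by omega
      simp [h1, h2, h3]
      rw [if_pos (by omega : (t + t) % 2 = 0)]
      ring
    · subst ht
      have h1 : (2 * t + 1 + 1) / 2 = t + 1 := by omega
      have h2 : (2 * t + 1) / 2 = t := by omega
      have h3 : (2 * t + 1 + 1 + 1) / 2 = t + 1 := by omega
      have h4 : ¬ ((2 * t + 1) % 2 = 0) := by omega
      simp [h1, h2, h3]
      ring

lemma pv_count_total (N : Nat) :
    ((N + 1) / 2) * ((N + 1) / 2) + (N / 2) * (N / 2) = (N * N + 1) / 2 := by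
  rcases Nat.even_or_odd N with ⟨t, ht⟩ | ⟨t, ht⟩ <;> subst ht
  · have h1 : (t + t + 1) / 2 = t := by omega
    have h2 : (t + t) / 2 = t := by omega
    have h3 : (t + t) * (t + t) = 4 * (t * t) := by ring
    rw [h1, h2, h3]
    generalize t * t = s
    omega
  · have h1 : (2 * t + 1 + 1) / 2 = t + 1 := by omega
    have h2 : (2 * t + 1) / 2 = t := by omega
    have h3 : (2 * t + 1) * (2 * t + 1) = 4 * (t * t) + 4 * t + 1 := by ring
    have h4 : (t + 1) * (t + 1) = t * t + 2 * t + 1 := by ring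
    rw [h1, h2, h3, h4]
    generalize t * t = s
    omega

-- row-content lemmas: parity of i decides which template row A builds
lemma pv_row_even (i : Int) (m : Nat) (hi : i % 2 = 0) :
    pvRowList i m = (List.range m).map (fun (j : Nat) => if PySem.Int.mod (j : Int) 2 = 0 then "C" else ".") := by
  unfold pvRowList
  apply List.map_congr_left
  intro j _
  have ha : PySem.Int.mod (i + (j : Int)) 2 = (i + (j : Int)) % 2 := PySem.Int.mod_eq_emod_of_pos (by norm_num)
  have hb : PySem.Int.mod ((j : Int)) 2 = ((j : Int)) % 2 := PySem.Int.mod_eq_emod_of_pos (by norm_num)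
  rw [ha, hb]
  have : (i + (j : Int)) % 2 = ((j : Int)) % 2 := by omega
  rw [this]

lemma pv_row_odd (i : Int) (m : Nat) (hi : i % 2 = 1) :
    pvRowList i m = (List.range m).map (fun (j : Nat) => if PySem.Int.mod (j : Int) 2 = 0 then "." else "C") := by
  unfold pvRowList
  apply List.map_congr_left
  intro j _
  have ha : PySem.Int.mod (i + (j : Int)) 2 = (i + (j : Int)) % 2 := PySem.Int.mod_eq_emod_of_pos (by norm_num)
  have hb : PySem.Int.mod ((j : Int)) 2 = ((j : Int)) % 2 := PySem.Int.mod_eq_emod_of_pos (by norm_num)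
  rw [ha, hb]
  by_cases h : ((j : Int)) % 2 = 0
  · rw [if_pos h, if_neg (by omega)]
  · rw [if_neg h, if_pos (by omega)]

-- outer loop characterisation
lemma pv_outer (n : Int) (m : Nat) :
    (((List.range m).map (fun (k : Nat) => (k : Int))).foldl
      (fun (st : Int × List String) i =>
        let r := (((List.range n.toNat).map (fun (k : Nat) => (k : Int)))).foldl
          (fun (rc : List String × Int) j =>
            if PySem.Int.mod (i + j) 2 = 0 then (rc.1 ++ ["C"], rc.2 + 1)
            else (rc.1 ++ ["."], rc.2))
          ([], st.1)
        (r.2, st.2 ++ [PySem.Str.join "" r.1]))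
      (0, []))
    = (((((List.range m).map (fun (i : Nat) => pvCnt (i : Int) n.toNat)).sum : Nat) : Int),
       (List.range m).map (fun (i : Nat) => PySem.Str.join "" (pvRowList (i : Int) n.toNat))) := by
  induction m with
  | zero => simp
  | succ m ih =>
    rw [List.range_succ, List.map_append, List.foldl_append, ih]
    simp only [List.map_cons, List.map_nil, List.foldl_cons, List.foldl_nil]
    rw [pv_inner]
    simp

-- ===== VERDICT (by name: the statement is the Claim_ definition above) =====
theorem max_coders_chessboard_spec : Claim_equal_max_coders_chessboard := by
  intro n _ hpre
  have hpre' : 1 ≤ n ∧ n ≤ 1000 := hpre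
  unfold Spec_max_coders_chessboard max_coders_chessboard max_coders_chessboard_alt
  rw [if_neg (not_not_intro hpre'), if_neg (not_not_intro hpre')]
  have hr : PySem.List.pyRange 0 n 1 = (List.range n.toNat).map (fun (k : Nat) => (k : Int)) := by
    rw [PySem.List.pyRange_one]; simp
  simp only [hr]
  rw [pv_outer n n.toNat]
  simp only [List.map_map, Function.comp_def]
  have hcast : n = ((n.toNat : Nat) : Int) := (Int.toNat_of_nonneg (by omega)).symm
  have hsum : (List.map (fun (i : Nat) => pvCnt (i : Int) n.toNat) (List.range n.toNat)).sum
      = (n.toNat * n.toNat + 1) / 2 := by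
    have hmap : List.map (fun (i : Nat) => pvCnt (i : Int) n.toNat) (List.range n.toNat)
        = List.map (fun (i : Nat) => if i % 2 = 0 then (n.toNat + 1) / 2 else n.toNat / 2)
            (List.range n.toNat) := by
      apply List.map_congr_left
      intro i _
      rw [pv_cnt_closed]
      by_cases h : i % 2 = 0
      · rw [if_pos (by omega : (i : Int) % 2 = 0), if_pos h]
      · rw [if_neg (by omega : ¬ ((i : Int) % 2 = 0)), if_neg h]
    rw [hmap, pv_sum_ite_parity, pv_count_total]
  have hfd : PySem.Int.floordiv (n * n + 1) 2 = (((n.toNat * n.toNat + 1) / 2 : Nat) : Int) := by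
    have h1 : n * n + 1 = ((n.toNat * n.toNat + 1 : Nat) : Int) := by
      push_cast
      rw [Int.toNat_of_nonneg (by omega : (0:Int) ≤ n)]
    rw [h1]
    exact_mod_cast PySem.Int.floordiv_natCast (n.toNat * n.toNat + 1) 2
  have hboard : List.map (fun (i : Nat) => PySem.Str.join "" (pvRowList (i : Int) n.toNat)) (List.range n.toNat)
      = List.map (fun (i : Nat) =>
          if PySem.Int.mod ((i : Nat) : Int) 2 = 0 then
            PySem.Str.join "" (List.map (fun (j : Nat) => if PySem.Int.mod ((j : Nat) : Int) 2 = 0 then "C" else ".") (List.range n.toNat))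
          else
            PySem.Str.join "" (List.map (fun (j : Nat) => if PySem.Int.mod ((j : Nat) : Int) 2 = 0 then "." else "C") (List.range n.toNat)))
          (List.range n.toNat) := by
    apply List.map_congr_left
    intro i _
    have hm : PySem.Int.mod ((i : Nat) : Int) 2 = ((i : Nat) : Int) % 2 :=
      PySem.Int.mod_eq_emod_of_pos (by norm_num)
    by_cases h : i % 2 = 0
    · rw [hm, if_pos (by omega : ((i : Nat) : Int) % 2 = 0), pv_row_even (i : Int) n.toNat (by omega)]
    · rw [hm, if_neg (by omega : ¬ (((i : Nat) : Int) % 2 = 0)), pv_row_odd (i : Int) n.toNat (by omega)]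
  rw [hboard]
  rw [show ((List.map (fun (i : Nat) => pvCnt (i : Int) n.toNat) (List.range n.toNat)).sum : Int)
      = PySem.Int.floordiv (n * n + 1) 2 by rw [hsum, hfd]]
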